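-- pv_equiv track=rewrite | github.com/aiulus/pyident | experiments/sim_equi.py | _parse_algorithms
-- ===== SOURCE A (Python) =====
-- from typing import Dict, List, Optional, Sequence, Tuple, Union
--
-- def _parse_algorithms(arg: Optional[str]) -> Optional[List[str]]:
--     if arg is None:
--         return None
--     parsed: List[str] = []
--     for chunk in arg.split(","):
--         chunk = chunk.strip()
--         if not chunk:
--             continue
--         parsed.extend(part for part in chunk.split() if part)
--     return parsed or None
-- ===== SOURCE B (Python) =====
-- from typing import List, Optional
--
--
-- def _parse_algorithms(arg: Optional[str]) -> Optional[List[str]]: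
--     if arg is None:
--         return None
--     tokens: List[str] = []
--     cur: List[str] = []
--     for c in arg:
--         if c == "," or c.isspace():
--             if cur:
--                 tokens.append("".join(cur))
--                 cur = []
--         else:
--             cur.append(c)
--     if cur:
--         tokens.append("".join(cur))
--     return tokens or None
-- ===== Notes on version B (the rewrite author's own statement) =====
-- stated objective: alternative
-- what changed: Replaces the nested split-on-comma / strip / split-on-whitespace passes with a single character-level scan that accumulates the current token and flushes it at each comma or whitespace delimiter.
import Mathlib
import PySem

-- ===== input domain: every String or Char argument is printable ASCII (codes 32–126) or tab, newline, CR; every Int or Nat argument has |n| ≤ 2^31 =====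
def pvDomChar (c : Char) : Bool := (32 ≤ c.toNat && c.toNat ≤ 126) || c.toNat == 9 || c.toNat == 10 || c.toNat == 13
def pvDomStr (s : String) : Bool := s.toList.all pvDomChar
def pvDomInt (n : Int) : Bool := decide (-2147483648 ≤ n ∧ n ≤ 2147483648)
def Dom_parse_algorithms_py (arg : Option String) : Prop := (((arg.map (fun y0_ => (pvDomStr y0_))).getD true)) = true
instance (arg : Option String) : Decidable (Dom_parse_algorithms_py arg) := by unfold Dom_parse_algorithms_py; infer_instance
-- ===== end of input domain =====

-- B replaces A's nested split-on-comma / strip / split-on-whitespace passes with one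
-- character-level scan that flushes the current token at each comma or whitespace (alternative).

-- ===== PORT A =====
-- A: split on ",", strip each chunk, skip empty chunks, extend with the chunk's
-- whitespace-split nonempty parts; 'parsed or None' at the end.
def parse_algorithms_py (arg : Option String) : Option (List String) :=
  match arg with
  | none => none
  | some s =>
    -- arg.split(","): sep is nonempty, so PySem.Chars.splitOn is exact here
    let chunks : List String := (PySem.Chars.splitOn s.toList [',']).map String.ofList
    let parsed : List String := chunks.foldl (fun parsed chunk =>
      let chunk := PySem.Str.strip chunk
      if chunk = "" then parsed
      else parsed ++ (PySem.Str.split₀ chunk).filter (fun part => part ≠ "")) []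
    if parsed.isEmpty then none else some parsed

-- ===== PORT B =====
-- B: one pass over the characters; (tokens, cur) accumulator, flush at ',' / whitespace.
def parse_algorithms_py_alt (arg : Option String) : Option (List String) :=
  match arg with
  | none => none
  | some s =>
    let r := s.toList.foldl (fun (st : List String × List Char) c =>
      if c = ',' || PySem.Chars.isspace c then
        (if st.2.isEmpty then st.1 else st.1 ++ [String.ofList st.2], [])
      else (st.1, st.2 ++ [c])) ([], [])
    let tokens := if r.2.isEmpty then r.1 else r.1 ++ [String.ofList r.2]
    if tokens.isEmpty then none else some tokens

-- ===== PRECONDITION & SPEC =====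
def Spec_parse_algorithms_py (arg : Option String) (out : Option (List String)) : Prop := out = parse_algorithms_py_alt arg
instance (arg : Option String) (out : Option (List String)) : Decidable (Spec_parse_algorithms_py arg out) := by unfold Spec_parse_algorithms_py; infer_instance

-- ===== CLAIM (what is proved, stated in full; the proofs are below) =====
def Claim_equal_parse_algorithms_py : Prop := ∀ (arg : Option String), Dom_parse_algorithms_py arg → Spec_parse_algorithms_py arg (parse_algorithms_py arg)

-- ===== LEMMAS AND PROOFS =====

-- Tokenizer core: (emitted tokens, pending token) after scanning cs with delimiter predicate d.
def pvScan (d : Char → Bool) : List Char → List Char → List (List Char) × List Char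
  | [], cur => ([], cur)
  | c :: rest, cur =>
    if d c then
      let r := pvScan d rest []
      (if cur.isEmpty then r.1 else cur :: r.1, r.2)
    else pvScan d rest (cur ++ [c])

-- finished token list
def pvFin (p : List (List Char) × List Char) : List (List Char) :=
  p.1 ++ (if p.2.isEmpty then [] else [p.2])

def pvWS : Char → Bool := PySem.Chars.isspace
def pvD2 (c : Char) : Bool := c = ',' || PySem.Chars.isspace c

-- split on ',' (reference form of Chars.splitOn with single-char sep)
def pvCommaGo : List Char → List Char → List (List Char)
  | [], cur => [cur]
  | c :: rest, cur => if c = ',' then cur :: pvCommaGo rest [] else pvCommaGo rest (cur ++ [c])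

theorem pvScan_emitted_ne_nil (d : Char → Bool) (cs cur : List Char) :
    ∀ t ∈ (pvScan d cs cur).1, t ≠ [] := by
  induction cs generalizing cur with
  | nil => simp [pvScan]
  | cons c rest ih =>
    intro t ht
    by_cases h : d c = true
    · simp only [pvScan, h, if_pos] at ht
      by_cases hc : cur.isEmpty
      · simp only [hc, if_pos] at ht; exact ih [] t ht
      · simp only [hc] at ht
        rcases List.mem_cons.mp ht with h1 | h1
        · subst h1; simpa [List.isEmpty_iff] using hc
        · exact ih [] t h1
    · simp only [pvScan, h, if_neg, Bool.false_eq_true, not_false_iff] at ht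
      exact ih (cur ++ [c]) t ht

theorem pvFin_ne_nil (d : Char → Bool) (cs : List Char) :
    ∀ t ∈ pvFin (pvScan d cs []), t ≠ [] := by
  intro t ht
  rcases List.mem_append.mp ht with h | h
  · exact pvScan_emitted_ne_nil d cs [] t h
  · split at h
    · simp at h
    · rename_i h2
      simp only [List.mem_singleton] at h
      subst h; simpa [List.isEmpty_iff] using h2

-- split₀.go characterization
theorem pvSplit₀_go_eq (cs : List Char) : ∀ (cur : List Char) (acc : List (List Char)),
    PySem.Chars.split₀.go cs cur acc = acc.reverse ++ pvFin (pvScan pvWS cs cur.reverse) := by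
  induction cs with
  | nil =>
    intro cur acc
    by_cases h : cur.isEmpty <;>
      simp_all [PySem.Chars.split₀.go, pvScan, pvFin, List.isEmpty_iff]
  | cons c rest ih =>
    intro cur acc
    by_cases h : PySem.Chars.isspace c
    · by_cases hc : cur.isEmpty
      · have hc' : cur = [] := List.isEmpty_iff.mp hc
        subst hc'
        simp [PySem.Chars.split₀.go, h, pvScan, pvWS, ih]
      · have hc' : cur.reverse.isEmpty = false := by
          simp [List.isEmpty_iff] at hc ⊢; exact hc
        simp [PySem.Chars.split₀.go, h, hc, pvScan, pvWS, hc', ih, pvFin]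
    · simp [PySem.Chars.split₀.go, h, pvScan, pvWS, ih, pvFin]

theorem pvSplit₀_eq (cs : List Char) :
    PySem.Chars.split₀ cs = pvFin (pvScan pvWS cs []) := by
  simpa using pvSplit₀_go_eq cs [] []

theorem pvSplitOn_go_eq (fuel : Nat) : ∀ (l cur : List Char) (acc : List (List Char)),
    l.length ≤ fuel →
    PySem.Chars.splitOn.go [','] fuel l cur acc = acc.reverse ++ pvCommaGo l cur.reverse := by
  induction fuel with
  | zero =>
    intro l cur acc hl
    have : l = [] := List.eq_nil_of_length_eq_zero (Nat.le_zero.mp hl)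
    subst this
    simp [PySem.Chars.splitOn.go, pvCommaGo]
  | succ fuel ih =>
    intro l cur acc hl
    match l with
    | [] => simp [PySem.Chars.splitOn.go, pvCommaGo]
    | c :: rest =>
      have hr : rest.length ≤ fuel := by simpa using Nat.lt_succ_iff.mp (by simpa using hl)
      by_cases h : c = ','
      · subst h
        have hp : [','].isPrefixOf (',' :: rest) = true := by simp [List.isPrefixOf]
        simp [PySem.Chars.splitOn.go, hp, ih rest [] _ hr, pvCommaGo]
      · have hp : [','].isPrefixOf (c :: rest) = false := by
          simp [List.isPrefixOf]; exact fun hh => (h hh.symm).elim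
        simp [PySem.Chars.splitOn.go, hp, ih rest (c :: cur) _ hr, pvCommaGo, h]

theorem pvSplitOn_eq (cs : List Char) :
    PySem.Chars.splitOn cs [','] = pvCommaGo cs [] := by
  simpa using pvSplitOn_go_eq (cs.length + 1) cs [] [] (Nat.le_succ _)

-- scan over appended all-delimiter suffix changes nothing in the finished tokens
theorem pvScan_append (d : Char → Bool) (xs : List Char) : ∀ (ys cur : List Char),
    pvScan d (xs ++ ys) cur =
      ((pvScan d xs cur).1 ++ (pvScan d ys (pvScan d xs cur).2).1,
       (pvScan d ys (pvScan d xs cur).2).2) := by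
  induction xs with
  | nil => intro ys cur; simp [pvScan]
  | cons c rest ih =>
    intro ys cur
    by_cases h : d c
    · by_cases hc : cur.isEmpty <;> simp [pvScan, h, hc, ih]
    · simp [pvScan, h, ih]

-- scanning a nonempty all-delimiter list just flushes the pending token
theorem pvScan_all_delim (d : Char → Bool) (ws : List Char) (hne : ws ≠ [])
    (hws : ∀ c ∈ ws, d c) :
    ∀ cur, pvScan d ws cur = (if cur.isEmpty then [] else [cur], []) := by
  induction ws with
  | nil => exact absurd rfl hne
  | cons c rest ih =>
    intro cur
    have hc : d c := hws c (List.mem_cons_self)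
    have hrest : ∀ c ∈ rest, d c := fun c hc => hws c (List.mem_cons_of_mem _ hc)
    match rest with
    | [] => by_cases h : cur.isEmpty <;> simp [pvScan, hc, h]
    | c' :: rest' =>
      have ih' := ih (by simp) hrest
      rw [pvScan.eq_def]
      simp only [hc, if_true, ih' []]
      by_cases h : cur.isEmpty <;> simp [h]

-- leading whitespace is ignored by the scan
theorem pvScan_dropWhile (s : List Char) :
    pvScan pvWS (List.dropWhile pvWS s) [] = pvScan pvWS s [] := by
  induction s with
  | nil => simp
  | cons c rest ih =>
    by_cases h : pvWS c
    · simp [List.dropWhile, h, pvScan, ih]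
    · simp [List.dropWhile, h]

-- trailing whitespace is ignored by the finished token list
theorem pvFin_append_ws (xs ws cur : List Char) (hws : ∀ c ∈ ws, pvWS c) :
    pvFin (pvScan pvWS (xs ++ ws) cur) = pvFin (pvScan pvWS xs cur) := by
  match ws with
  | [] => simp
  | w :: ws' =>
    rw [pvScan_append, pvScan_all_delim pvWS (w :: ws') (by simp) hws]
    by_cases h : (pvScan pvWS xs cur).2.isEmpty <;> simp [pvFin, h]

theorem pvStrip_split₀ (s : List Char) :
    PySem.Chars.split₀ (PySem.Chars.strip s) = PySem.Chars.split₀ s := by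
  rw [pvSplit₀_eq, pvSplit₀_eq]
  have hL : PySem.Chars.lstrip s = List.dropWhile pvWS s := rfl
  have hpv : pvWS = PySem.Chars.isspace := rfl
  have key : ∀ (p : Char → Bool) (l : List Char),
      (List.dropWhile p l.reverse).reverse ++ (List.takeWhile p l.reverse).reverse = l := by
    intro p l
    rw [← List.reverse_append, List.takeWhile_append_dropWhile, List.reverse_reverse]
  have hdecomp : List.dropWhile pvWS s =
      PySem.Chars.strip s ++ (List.takeWhile pvWS (List.dropWhile pvWS s).reverse).reverse := by
    show _ = PySem.Chars.rstrip (PySem.Chars.lstrip s) ++ _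
    unfold PySem.Chars.rstrip
    rw [hL, hpv, key]
  have hws : ∀ c ∈ (List.takeWhile pvWS (List.dropWhile pvWS s).reverse).reverse, pvWS c := by
    intro c hc
    exact List.mem_takeWhile_imp (by simpa using hc)
  calc pvFin (pvScan pvWS (PySem.Chars.strip s) [])
      = pvFin (pvScan pvWS (List.dropWhile pvWS s) []) := by
        rw [hdecomp]; exact (pvFin_append_ws _ _ _ hws).symm
    _ = pvFin (pvScan pvWS s []) := by rw [pvScan_dropWhile]

-- commaGo prefix lemma
theorem pvCommaGo_general (l : List Char) :
    ∃ h t, pvCommaGo l [] = h :: t ∧ ∀ q, pvCommaGo l q = (q ++ h) :: t := by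
  induction l with
  | nil => exact ⟨[], [], rfl, fun q => by simp [pvCommaGo]⟩
  | cons c rest ih =>
    by_cases hc : c = ','
    · exact ⟨[], pvCommaGo rest [], by simp [pvCommaGo, hc],
        fun q => by simp [pvCommaGo, hc]⟩
    · obtain ⟨h, t, h1, h2⟩ := ih
      refine ⟨c :: h, t, ?_, fun q => ?_⟩
      · show pvCommaGo (c :: rest) [] = _
        rw [pvCommaGo.eq_def]
        simp only [hc, if_false]
        simpa using h2 [c]
      · show pvCommaGo (c :: rest) q = _
        rw [pvCommaGo.eq_def]
        simp only [hc, if_false]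
        rw [h2 (q ++ [c])]
        simp

-- main merge lemma: tokenizing with the combined delimiter equals comma-chunking
-- followed by whitespace-tokenizing each chunk
theorem pvMerge (cs : List Char) : ∀ (cur : List Char),
    pvFin (pvScan pvD2 cs cur) =
      match pvCommaGo cs [] with
      | [] => []
      | ch :: rest =>
        pvFin (pvScan pvWS ch cur) ++ rest.flatMap (fun ch => pvFin (pvScan pvWS ch [])) := by
  induction cs with
  | nil => intro cur; simp [pvCommaGo, pvScan, pvFin]
  | cons c rest ih =>
    intro cur
    have hflat : ∀ (l : List Char),
        (match pvCommaGo l [] with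
          | [] => []
          | ch :: r => pvFin (pvScan pvWS ch []) ++ r.flatMap (fun ch => pvFin (pvScan pvWS ch [])))
        = (pvCommaGo l []).flatMap (fun ch => pvFin (pvScan pvWS ch [])) := by
      intro l
      obtain ⟨h, t, h1, _⟩ := pvCommaGo_general l
      rw [h1]
      simp [List.flatMap_cons]
    by_cases hc : c = ','
    · subst hc
      have hd2 : pvD2 ',' = true := by simp [pvD2]
      rw [pvScan.eq_def]
      simp only [hd2, if_true]
      have : pvCommaGo (',' :: rest) [] = [] :: pvCommaGo rest [] := by
        simp [pvCommaGo]
      rw [this]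
      dsimp only
      have lhs_eq : pvFin (if cur.isEmpty then (pvScan pvD2 rest []).1
            else cur :: (pvScan pvD2 rest []).1, (pvScan pvD2 rest []).2)
          = (if cur.isEmpty then [] else [cur]) ++ pvFin (pvScan pvD2 rest []) := by
        by_cases h : cur.isEmpty <;> simp [pvFin, h]
      rw [lhs_eq, ih [], hflat rest]
      have : pvFin (pvScan pvWS [] cur) = if cur.isEmpty then [] else [cur] := by
        by_cases h : cur.isEmpty <;> simp [pvScan, pvFin, h]
      rw [this]
    · obtain ⟨h, t, h1, h2⟩ := pvCommaGo_general rest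
      have hcomma : pvCommaGo (c :: rest) [] = (c :: h) :: t := by
        rw [pvCommaGo.eq_def]
        simp only [hc, if_false]
        simpa using h2 [c]
      rw [hcomma]
      dsimp only
      by_cases hw : PySem.Chars.isspace c
      · have hd2 : pvD2 c = true := by simp [pvD2, hw]
        have hws : pvWS c = true := hw
        rw [pvScan.eq_def]
        simp only [hd2, if_true]
        have lhs_eq : pvFin (if cur.isEmpty then (pvScan pvD2 rest []).1
              else cur :: (pvScan pvD2 rest []).1, (pvScan pvD2 rest []).2)
            = (if cur.isEmpty then [] else [cur]) ++ pvFin (pvScan pvD2 rest []) := by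
          by_cases hcc : cur.isEmpty <;> simp [pvFin, hcc]
        rw [lhs_eq, ih [], h1]
        have rhs_eq : pvFin (pvScan pvWS (c :: h) cur)
            = (if cur.isEmpty then [] else [cur]) ++ pvFin (pvScan pvWS h []) := by
          rw [pvScan.eq_def]
          simp only [hws, if_true]
          by_cases hcc : cur.isEmpty <;> simp [pvFin, hcc]
        rw [rhs_eq]
        simp
      · have hd2 : pvD2 c = false := by simp [pvD2, hc, hw]
        have hws : pvWS c = false := by simpa [pvWS] using hw
        rw [pvScan.eq_def]
        simp only [hd2, Bool.false_eq_true, if_false]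
        rw [ih (cur ++ [c]), h1]
        have rhs_eq : pvScan pvWS (c :: h) cur = pvScan pvWS h (cur ++ [c]) := by
          rw [pvScan.eq_def]
          simp [hws]
        rw [rhs_eq]

-- flatMap form of the merge lemma
theorem pvMergeFlat (cs : List Char) :
    pvFin (pvScan pvD2 cs []) =
      (pvCommaGo cs []).flatMap (fun ch => pvFin (pvScan pvWS ch [])) := by
  obtain ⟨h, t, h1, _⟩ := pvCommaGo_general cs
  rw [pvMerge cs [], h1]
  simp [List.flatMap_cons]

-- B's foldl in terms of pvScan
theorem pvFoldB (cs : List Char) : ∀ (toks : List String) (cur : List Char),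
    cs.foldl (fun (st : List String × List Char) c =>
      if c = ',' || PySem.Chars.isspace c then
        (if st.2.isEmpty then st.1 else st.1 ++ [String.ofList st.2], [])
      else (st.1, st.2 ++ [c])) (toks, cur)
    = (toks ++ ((pvScan pvD2 cs cur).1).map String.ofList, (pvScan pvD2 cs cur).2) := by
  induction cs with
  | nil => intro toks cur; simp [pvScan]
  | cons c rest ih =>
    intro toks cur
    rw [List.foldl_cons]
    by_cases hd : pvD2 c
    · have hd' : (decide (c = ',') || PySem.Chars.isspace c) = true := hd
      rw [if_pos hd']
      by_cases hcur : cur.isEmpty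
      · rw [if_pos hcur, ih toks []]
        have hsc : pvScan pvD2 (c :: rest) cur
            = ((pvScan pvD2 rest []).1, (pvScan pvD2 rest []).2) := by
          rw [pvScan.eq_def]; simp [hd, hcur]
        rw [hsc]
      · rw [if_neg hcur, ih (toks ++ [String.ofList cur]) []]
        have hsc : pvScan pvD2 (c :: rest) cur
            = (cur :: (pvScan pvD2 rest []).1, (pvScan pvD2 rest []).2) := by
          rw [pvScan.eq_def]; simp [hd, hcur]
        rw [hsc]
        simp
    · have hd' : (decide (c = ',') || PySem.Chars.isspace c) = false := by
        simpa [pvD2] using hd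
      rw [if_neg (by simp [hd'])]
      rw [ih toks (cur ++ [c])]
      have hsc : pvScan pvD2 (c :: rest) cur = pvScan pvD2 rest (cur ++ [c]) := by
        rw [pvScan.eq_def]; simp [hd]
      rw [hsc]

-- A's per-chunk contribution equals the whitespace tokens of the chunk
theorem pvChunk (ch : List Char) :
    (if PySem.Str.strip (String.ofList ch) = "" then ([] : List String)
     else (PySem.Str.split₀ (PySem.Str.strip (String.ofList ch))).filter (fun p => p ≠ ""))
    = (pvFin (pvScan pvWS ch [])).map String.ofList := by
  have hstrip : PySem.Str.strip (String.ofList ch) = String.ofList (PySem.Chars.strip ch) := by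
    show String.ofList (PySem.Chars.strip (String.ofList ch).toList) = _
    rw [String.toList_ofList]
  have hsp : PySem.Chars.split₀ (PySem.Chars.strip ch) = pvFin (pvScan pvWS ch []) := by
    rw [pvStrip_split₀, pvSplit₀_eq]
  by_cases hz : PySem.Chars.strip ch = []
  · have h0 : PySem.Str.strip (String.ofList ch) = "" := by
      rw [hstrip, hz]
    rw [if_pos h0, ← hsp, hz]
    rfl
  · have h0 : PySem.Str.strip (String.ofList ch) ≠ "" := by
      rw [hstrip]
      intro h
      exact hz (by simpa using String.ofList_inj.mp (by simpa using h))
    rw [if_neg h0, hstrip]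
    show (List.map String.ofList (PySem.Chars.split₀ (String.ofList (PySem.Chars.strip ch)).toList)).filter _ = _
    rw [String.toList_ofList, hsp]
    rw [List.filter_map]
    have hall : ∀ t ∈ pvFin (pvScan pvWS ch []), ((fun p => decide ¬p = "") ∘ String.ofList) t = true := by
      intro t ht
      have := pvFin_ne_nil pvWS ch t ht
      simp only [Function.comp, decide_eq_true_eq]
      intro h
      exact this (by simpa using String.ofList_inj.mp (by simpa using h))
    rw [List.filter_eq_self.mpr hall]

-- ===== VERDICT (by name: the statement is the Claim_ definition above) =====
theorem parse_algorithms_py_spec : Claim_equal_parse_algorithms_py := by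
  intro arg _
  unfold Spec_parse_algorithms_py parse_algorithms_py parse_algorithms_py_alt
  match arg with
  | none => rfl
  | some s =>
    dsimp only
    rw [pvFoldB s.toList [] []]
    rw [pvSplitOn_eq]
    -- rewrite A's foldl as a flatMap of per-chunk token lists
    have hfold : ∀ (l : List String),
        l.foldl (fun parsed chunk =>
          let chunk := PySem.Str.strip chunk
          if chunk = "" then parsed
          else parsed ++ (PySem.Str.split₀ chunk).filter (fun part => part ≠ "")) []
        = l.flatMap (fun chunk =>
            if PySem.Str.strip chunk = "" then []
            else (PySem.Str.split₀ (PySem.Str.strip chunk)).filter (fun p => p ≠ "")) := by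
      intro l
      have hfun : (fun (parsed : List String) chunk =>
          let chunk := PySem.Str.strip chunk
          if chunk = "" then parsed
          else parsed ++ (PySem.Str.split₀ chunk).filter (fun part => part ≠ ""))
          = (fun acc chunk => acc ++
              (if PySem.Str.strip chunk = "" then []
               else (PySem.Str.split₀ (PySem.Str.strip chunk)).filter (fun p => p ≠ ""))) := by
        funext parsed chunk
        by_cases h : PySem.Str.strip chunk = "" <;> simp [h]
      rw [hfun, PySem.List.foldl_append_eq_flatMap, List.nil_append]
    rw [hfold, List.flatMap_map]
    have hchunks : (pvCommaGo s.toList []).flatMap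
        (fun a =>
            if PySem.Str.strip (String.ofList a) = "" then []
            else (PySem.Str.split₀ (PySem.Str.strip (String.ofList a))).filter (fun p => p ≠ ""))
        = ((pvCommaGo s.toList []).flatMap (fun ch => pvFin (pvScan pvWS ch []))).map String.ofList := by
      rw [List.map_flatMap]
      exact List.flatMap_congr (fun ch _ => pvChunk ch)
    rw [hchunks, ← pvMergeFlat]
    -- both sides are now the same token list; the final or-None guards agree
    set toks := pvFin (pvScan pvD2 s.toList [])
    by_cases h : (pvScan pvD2 s.toList []).2.isEmpty
    · simp [toks, pvFin, h]
    · simp [toks, pvFin, h]
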